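-- pv_equiv track=rewrite | github.com/juderozario08/PythonProjects | ExamReview/exam prep 2020 questions/q8_6.py | biggestRange
-- ===== SOURCE A (Python) =====
-- def biggestRange(matrix) :
--   '''
--   Assume that matrix is a two-dimensional rectangular matrix of integers.
--   Return the index of the column with the biggest range of numbers,
--   where range is calculated as the maximum minus the minimum number in the column.
--
--   For example, in the following matrix the first column has range 1 to 20,
--   the second column has range 2 to 10, and the third column has range 3 to
--   38.  Taking the differences for the size of the ranges: 19, 8, 35, so
--   column 2 (the third column)  has the largest range,
--   and the function would return 2.
--   [[5, 2, 38],\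
--     [1, 2, 20],\
--     [3, 10, 3],\
--     [20, 8, 9],\
--     [8, 10, 5]]
--   If there is a tie, return the lowest column number of the tie.
--   Hint: it might help to convert a column to a simple list so that you can
--   use the min and max functions.
--   '''
--
--   transposedMatrix = []
--   temp = []
--
--   for i in range (len(matrix[0])):
--     for j in range (len(matrix)):
--       temp.append(matrix[j][i])
--
--       if len(temp) == len(matrix):
--         transposedMatrix.append(temp)
--         temp = []
--
--   largestColumn = 0
--   largestRange = max(transposedMatrix[0]) - min(transposedMatrix[0])
--
--   for c in range (len(transposedMatrix)):
--     currentRange = max(transposedMatrix[c]) - min(transposedMatrix[c])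
--
--     if currentRange > largestRange:
--       largestColumn = c
--       largestRange = currentRange
--
--   return largestColumn
-- ===== SOURCE B (Python) =====
-- def biggestRange(matrix):
--     # One pass over the rows maintaining per-column running min/max; no transposed copy of the matrix.
--     ncols = len(matrix[0])
--     col_min = list(matrix[0])
--     col_max = list(matrix[0])
--     for row in matrix[1:]:
--         col_min = [min(col_min[i], row[i]) for i in range(ncols)]
--         col_max = [max(col_max[i], row[i]) for i in range(ncols)]
--     best = 0
--     for i in range(1, ncols):
--         if col_max[i] - col_min[i] > col_max[best] - col_min[best]:
--             best = i
--     return best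
-- ===== Notes on version B (the rewrite author's own statement) =====
-- stated objective: simpler
-- what changed: B drops A's transpose-building double loop (with its temp-buffer flushing) and instead makes one pass over the rows maintaining per-column running min and max lists, then takes the argmax of max-min over columns.
import Mathlib
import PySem

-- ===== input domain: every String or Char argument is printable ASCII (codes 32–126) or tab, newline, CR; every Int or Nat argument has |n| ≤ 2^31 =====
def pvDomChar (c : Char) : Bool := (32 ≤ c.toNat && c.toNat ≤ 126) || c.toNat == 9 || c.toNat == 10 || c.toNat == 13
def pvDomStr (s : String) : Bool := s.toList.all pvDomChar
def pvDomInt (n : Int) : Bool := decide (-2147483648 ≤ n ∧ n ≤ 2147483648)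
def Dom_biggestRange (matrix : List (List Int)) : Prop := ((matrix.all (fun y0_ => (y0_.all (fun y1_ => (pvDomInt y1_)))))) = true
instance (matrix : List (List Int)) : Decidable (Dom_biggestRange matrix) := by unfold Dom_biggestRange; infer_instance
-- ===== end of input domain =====

-- B replaces A's transpose-then-scan with a single pass over the rows keeping per-column
-- running min/max lists (objective: simpler — no transposed copy of the matrix is built).

-- ===== PORT A =====
-- Literal port of A. Indexing (matrix[0], matrix[j][i], transposedMatrix[0/c]) and max/min of a
-- list raise in Python when out of range / empty; ported with pyGetD / (max? ·).getD, exact under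
-- Pre_biggestRange, which admits exactly the inputs where every such access succeeds.
def biggestRange (matrix : List (List Int)) : Int :=
  let row0 := PySem.List.pyGetD matrix 0 []            -- matrix[0]
  let ncols : Int := row0.length
  let nrows : Int := matrix.length
  -- for i in range(len(matrix[0])): for j in range(len(matrix)): temp.append(...); if flush
  let tm : List (List Int) × List Int :=
    (PySem.List.pyRange 0 ncols 1).foldl (fun st i =>
      (PySem.List.pyRange 0 nrows 1).foldl (fun (st : List (List Int) × List Int) j =>
        let temp := st.2 ++ [PySem.List.pyGetD (PySem.List.pyGetD matrix j []) i 0]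
        if temp.length = matrix.length then (st.1 ++ [temp], ([] : List Int))
        else (st.1, temp)) st) ([], [])
  let transposed := tm.1
  let col0 := PySem.List.pyGetD transposed 0 []        -- transposedMatrix[0]
  let largestRange0 :=
    ((PySem.List.max? col0 (fun x => x)).getD 0) - ((PySem.List.min? col0 (fun x => x)).getD 0)
  let res : Int × Int :=
    (PySem.List.pyRange 0 (transposed.length : Int) 1).foldl (fun (st : Int × Int) c =>
      let colc := PySem.List.pyGetD transposed c []
      let cur := ((PySem.List.max? colc (fun x => x)).getD 0) - ((PySem.List.min? colc (fun x => x)).getD 0)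
      if cur > st.2 then (c, cur) else st) (0, largestRange0)
  res.1

-- ===== PORT B =====
-- Literal port of Source B: running per-column min/max over the rows, then an argmax over columns.
def biggestRange_alt (matrix : List (List Int)) : Int :=
  let row0 := PySem.List.pyGetD matrix 0 []            -- matrix[0]
  let ncols : Int := row0.length
  let st : List Int × List Int :=
    (PySem.List.slice matrix (some 1) none).foldl (fun (st : List Int × List Int) row =>
      ((PySem.List.pyRange 0 ncols 1).map (fun i =>
          min (PySem.List.pyGetD st.1 i 0) (PySem.List.pyGetD row i 0)),
       (PySem.List.pyRange 0 ncols 1).map (fun i =>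
          max (PySem.List.pyGetD st.2 i 0) (PySem.List.pyGetD row i 0))))
      (row0, row0)
  let cmin := st.1
  let cmax := st.2
  (PySem.List.pyRange 1 ncols 1).foldl (fun (best : Int) i =>
    if (PySem.List.pyGetD cmax i 0 - PySem.List.pyGetD cmin i 0) >
       (PySem.List.pyGetD cmax best 0 - PySem.List.pyGetD cmin best 0)
    then i else best) 0

-- ===== PRECONDITION & SPEC =====
-- Pre_ excludes exactly the inputs on which A raises IndexError: the empty matrix and a matrix
-- whose first row is empty (transposedMatrix[0] fails), and rows shorter than the first row
-- (matrix[j][i] fails). On all of these A returns no value.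
def Pre_biggestRange (matrix : List (List Int)) : Prop :=
  matrix ≠ [] ∧ matrix.headD [] ≠ [] ∧
  ∀ row ∈ matrix, (matrix.headD []).length ≤ row.length
instance (matrix : List (List Int)) : Decidable (Pre_biggestRange matrix) := by
  unfold Pre_biggestRange; infer_instance

def pvWitness_biggestRange : List (List Int) := [[5, 2, 38], [1, 2, 20], [3, 10, 3], [20, 8, 9], [8, 10, 5]]

def Spec_biggestRange (matrix : List (List Int)) (out : Int) : Prop := out = biggestRange_alt matrix
instance (matrix : List (List Int)) (out : Int) : Decidable (Spec_biggestRange matrix out) := by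
  unfold Spec_biggestRange; infer_instance

-- ===== CLAIM (what is proved, stated in full; the proofs are below) =====
def Claim_equal_biggestRange : Prop := ∀ (matrix : List (List Int)), Dom_biggestRange matrix → Pre_biggestRange matrix → Spec_biggestRange matrix (biggestRange matrix)

-- ===== LEMMAS AND PROOFS =====

-- column values: g i row = row[i] (total form), colv matrix i = the i-th column as a list
def pvG (i : Int) (row : List Int) : Int := PySem.List.pyGetD row i 0

-- A's inner loop over j flushes exactly once, at j = len(matrix)-1.
theorem pv_inner_aux (g : List Int → Int) (N : ℕ) :
    ∀ (ts : List (List Int)) (acc : List (List Int)) (temp : List Int),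
      ts ≠ [] → temp.length + ts.length = N →
      ts.foldl (fun (st : List (List Int) × List Int) row =>
          if (st.2 ++ [g row]).length = N then (st.1 ++ [st.2 ++ [g row]], ([] : List Int))
          else (st.1, st.2 ++ [g row])) (acc, temp)
        = (acc ++ [temp ++ ts.map g], []) := by
  intro ts
  induction ts with
  | nil => intro _ _ h _; exact absurd rfl h
  | cons r rs ih =>
    intro acc temp _ hlen
    by_cases hrs : rs = []
    · subst hrs
      simp only [List.foldl_cons, List.foldl_nil]
      have : (temp ++ [g r]).length = N := by simp at hlen ⊢; omega
      simp [this]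
    · have hne : ¬ (temp ++ [g r]).length = N := by
        have := List.length_pos_of_ne_nil hrs
        simp at hlen ⊢; omega
      simp only [List.foldl_cons]
      rw [if_neg hne]
      rw [ih acc (temp ++ [g r]) hrs (by simp at hlen ⊢; omega)]
      simp

theorem pv_inner (g : List Int → Int) (matrix : List (List Int)) (acc : List (List Int))
    (h : matrix ≠ []) :
    matrix.foldl (fun (st : List (List Int) × List Int) row =>
        if (st.2 ++ [g row]).length = matrix.length then (st.1 ++ [st.2 ++ [g row]], ([] : List Int))
        else (st.1, st.2 ++ [g row])) (acc, [])
      = (acc ++ [matrix.map g], []) := by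
  simpa using pv_inner_aux g matrix.length matrix acc [] h (by simp)

-- A's transposed matrix is the list of columns
theorem pv_transposed (matrix : List (List Int)) (h : matrix ≠ []) (n : Int) :
    (PySem.List.pyRange 0 n 1).foldl (fun st i =>
      (PySem.List.pyRange 0 (matrix.length : Int) 1).foldl (fun (st : List (List Int) × List Int) j =>
        if (st.2 ++ [PySem.List.pyGetD (PySem.List.pyGetD matrix j []) i 0]).length = matrix.length
        then (st.1 ++ [st.2 ++ [PySem.List.pyGetD (PySem.List.pyGetD matrix j []) i 0]], ([] : List Int))
        else (st.1, st.2 ++ [PySem.List.pyGetD (PySem.List.pyGetD matrix j []) i 0])) st) ([], [])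
    = ((PySem.List.pyRange 0 n 1).map (fun i => matrix.map (pvG i)), []) := by
  have step : ∀ (i : Int) (acc : List (List Int)),
      (PySem.List.pyRange 0 (matrix.length : Int) 1).foldl (fun (st : List (List Int) × List Int) j =>
        if (st.2 ++ [PySem.List.pyGetD (PySem.List.pyGetD matrix j []) i 0]).length = matrix.length
        then (st.1 ++ [st.2 ++ [PySem.List.pyGetD (PySem.List.pyGetD matrix j []) i 0]], ([] : List Int))
        else (st.1, st.2 ++ [PySem.List.pyGetD (PySem.List.pyGetD matrix j []) i 0])) (acc, [])
      = (acc ++ [matrix.map (pvG i)], []) := by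
    intro i acc
    rw [PySem.List.foldl_pyRange_zero_pyGetD' matrix ([] : List Int)
      (fun (st : List (List Int) × List Int) row =>
        if (st.2 ++ [PySem.List.pyGetD row i 0]).length = matrix.length
        then (st.1 ++ [st.2 ++ [PySem.List.pyGetD row i 0]], ([] : List Int))
        else (st.1, st.2 ++ [PySem.List.pyGetD row i 0])) (acc, [])]
    exact pv_inner (fun row => PySem.List.pyGetD row i 0) matrix acc h
  -- fold the outer loop: every iteration starts and ends with temp = []
  have : ∀ (l : List Int) (acc : List (List Int)),
      l.foldl (fun st i =>
        (PySem.List.pyRange 0 (matrix.length : Int) 1).foldl (fun (st : List (List Int) × List Int) j =>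
          if (st.2 ++ [PySem.List.pyGetD (PySem.List.pyGetD matrix j []) i 0]).length = matrix.length
          then (st.1 ++ [st.2 ++ [PySem.List.pyGetD (PySem.List.pyGetD matrix j []) i 0]], ([] : List Int))
          else (st.1, st.2 ++ [PySem.List.pyGetD (PySem.List.pyGetD matrix j []) i 0])) st) (acc, [])
      = (acc ++ l.map (fun i => matrix.map (pvG i)), []) := by
    intro l
    induction l with
    | nil => simp
    | cons x xs ih =>
      intro acc
      simp only [List.foldl_cons]
      rw [step x acc, ih]
      simp
  simpa using this (PySem.List.pyRange 0 n 1) []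

-- range (max - min) of the i-th column, written as B's running folds
def pvMn (r : List Int) (t : List (List Int)) (i : Int) : Int :=
  t.foldl (fun a row => min a (pvG i row)) (pvG i r)
def pvMx (r : List Int) (t : List (List Int)) (i : Int) : Int :=
  t.foldl (fun a row => max a (pvG i row)) (pvG i r)
def pvRng (r : List Int) (t : List (List Int)) (i : Int) : Int := pvMx r t i - pvMn r t i

-- A's max/min of the column equal the running folds
theorem pv_col_rng (r : List Int) (t : List (List Int)) (i : Int) :
    ((PySem.List.max? ((r :: t).map (pvG i)) (fun x => x)).getD 0)
      - ((PySem.List.min? ((r :: t).map (pvG i)) (fun x => x)).getD 0) = pvRng r t i := by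
  simp only [List.map_cons]
  rw [PySem.List.max?_id_cons, PySem.List.min?_id_cons]
  simp [pvRng, pvMx, pvMn, List.foldl_map]

-- B's row pass computes the running min/max pointwise on every column index in [0, n)
theorem pv_bfold (n : Int) :
    ∀ (t : List (List Int)) (cmin cmax : List Int) (mn mx : Int → Int),
      (∀ i : Int, 0 ≤ i → i < n → PySem.List.pyGetD cmin i 0 = mn i) →
      (∀ i : Int, 0 ≤ i → i < n → PySem.List.pyGetD cmax i 0 = mx i) →
      ∀ i : Int, 0 ≤ i → i < n →
        (PySem.List.pyGetD
          (t.foldl (fun (st : List Int × List Int) row =>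
            ((PySem.List.pyRange 0 n 1).map (fun i =>
                min (PySem.List.pyGetD st.1 i 0) (PySem.List.pyGetD row i 0)),
             (PySem.List.pyRange 0 n 1).map (fun i =>
                max (PySem.List.pyGetD st.2 i 0) (PySem.List.pyGetD row i 0))))
            (cmin, cmax)).1 i 0
          = t.foldl (fun a row => min a (pvG i row)) (mn i)) ∧
        (PySem.List.pyGetD
          (t.foldl (fun (st : List Int × List Int) row =>
            ((PySem.List.pyRange 0 n 1).map (fun i =>
                min (PySem.List.pyGetD st.1 i 0) (PySem.List.pyGetD row i 0)),
             (PySem.List.pyRange 0 n 1).map (fun i =>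
                max (PySem.List.pyGetD st.2 i 0) (PySem.List.pyGetD row i 0))))
            (cmin, cmax)).2 i 0
          = t.foldl (fun a row => max a (pvG i row)) (mx i)) := by
  intro t
  induction t with
  | nil =>
    intro cmin cmax mn mx hmn hmx i h0 hn
    exact ⟨hmn i h0 hn, hmx i h0 hn⟩
  | cons row rs ih =>
    intro cmin cmax mn mx hmn hmx i h0 hn
    simp only [List.foldl_cons]
    have h1 := ih ((PySem.List.pyRange 0 n 1).map (fun i =>
          min (PySem.List.pyGetD cmin i 0) (PySem.List.pyGetD row i 0)))
        ((PySem.List.pyRange 0 n 1).map (fun i =>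
          max (PySem.List.pyGetD cmax i 0) (PySem.List.pyGetD row i 0)))
        (fun i => min (mn i) (pvG i row)) (fun i => max (mx i) (pvG i row))
        (by
          intro i h0 hn
          rw [PySem.List.pyGetD_map_pyRange_of_nonneg _ n i 0 h0 hn, hmn i h0 hn]; rfl)
        (by
          intro i h0 hn
          rw [PySem.List.pyGetD_map_pyRange_of_nonneg _ n i 0 h0 hn, hmx i h0 hn]; rfl)
        i h0 hn
    exact h1

-- the two argmax loops agree when the two range functions agree on [0, n)
theorem pv_argmax (n : Int) (ra rb : Int → Int)
    (hagree : ∀ i : Int, 0 ≤ i → i < n → ra i = rb i) :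
    ∀ (l : List Int), (∀ x ∈ l, 0 ≤ x ∧ x < n) →
      ∀ (b : Int), 0 ≤ b → b < n →
      (l.foldl (fun (st : Int × Int) c =>
          if ra c > st.2 then (c, ra c) else st) (b, ra b)).1
        = l.foldl (fun (best : Int) i => if rb i > rb best then i else best) b := by
  intro l
  induction l with
  | nil => intro _ b _ _; simp
  | cons x xs ih =>
    intro hmem b hb0 hbn
    obtain ⟨hx0, hxn⟩ := hmem x (by simp)
    simp only [List.foldl_cons]
    have hx : ra x = rb x := hagree x hx0 hxn
    have hb : ra b = rb b := hagree b hb0 hbn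
    by_cases hgt : ra x > ra b
    · rw [if_pos hgt, if_pos (by omega)]
      exact ih (fun y hy => hmem y (by simp [hy])) x hx0 hxn
    · rw [if_neg hgt, if_neg (by omega)]
      exact ih (fun y hy => hmem y (by simp [hy])) b hb0 hbn

-- ===== VERDICT (by name: the statement is the Claim_ definition above) =====
theorem biggestRange_spec : Claim_equal_biggestRange := by
  intro matrix _ hpre
  obtain ⟨hne, hrow0, hlen⟩ := hpre
  obtain ⟨r, t, rfl⟩ : ∃ r t, matrix = r :: t := by
    cases matrix with
    | nil => exact absurd rfl hne
    | cons r t => exact ⟨r, t, rfl⟩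
  simp only [List.headD_cons] at hrow0 hlen
  have hrow0' : PySem.List.pyGetD (r :: t) 0 [] = r := PySem.List.pyGetD_zero_cons r t []
  unfold Spec_biggestRange
  simp only [biggestRange, biggestRange_alt, hrow0']
  set n : Int := (r.length : Int) with hn
  have hnpos : 0 < n := by
    have := List.length_pos_of_ne_nil hrow0
    simp [hn]; omega
  -- A: transposed matrix is the list of columns
  rw [pv_transposed (r :: t) hne n]
  simp only []
  set tr : List (List Int) := (PySem.List.pyRange 0 n 1).map (fun i => (r :: t).map (pvG i)) with htr
  have hcast : ((tr.length : Nat) : Int) = n := by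
    simp [htr, PySem.List.length_pyRange_one]; omega
  rw [hcast]
  -- transposed[c] for 0 ≤ c < n is the c-th column
  have hidx : ∀ c : Int, 0 ≤ c → c < n →
      PySem.List.pyGetD tr c [] = (r :: t).map (pvG c) := by
    intro c h0 hc
    exact PySem.List.pyGetD_map_pyRange_of_nonneg _ n c [] h0 hc
  -- replace A's loop body by the pvRng form
  have hA : ∀ init : Int × Int,
      List.foldl (fun (st : Int × Int) c =>
        if ((PySem.List.max? (PySem.List.pyGetD tr c []) (fun x => x)).getD 0 -
            (PySem.List.min? (PySem.List.pyGetD tr c []) (fun x => x)).getD 0) > st.2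
        then (c, (PySem.List.max? (PySem.List.pyGetD tr c []) (fun x => x)).getD 0 -
            (PySem.List.min? (PySem.List.pyGetD tr c []) (fun x => x)).getD 0) else st)
        init (PySem.List.pyRange 0 n 1)
      = List.foldl (fun (st : Int × Int) c =>
          if pvRng r t c > st.2 then (c, pvRng r t c) else st) init (PySem.List.pyRange 0 n 1) := by
    intro init
    refine PySem.List.foldl_congr_mem _ _ _ _ ?_
    intro acc c hc
    obtain ⟨h0, hcn⟩ := PySem.List.mem_pyRange_one.mp hc
    rw [hidx c h0 hcn, pv_col_rng]
  rw [hA]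
  rw [hidx 0 le_rfl hnpos, pv_col_rng r t 0]
  -- peel c = 0: pvRng 0 > pvRng 0 is false
  conv_lhs => rw [PySem.List.pyRange_one_cons hnpos]
  simp only [List.foldl_cons, zero_add]
  rw [if_neg (lt_irrefl (pvRng r t 0))]
  -- B: the row pass
  rw [PySem.List.slice_from_one]
  simp only [List.tail_cons]
  have hB := pv_bfold n t r r (fun i => pvG i r) (fun i => pvG i r)
    (fun _ _ _ => rfl) (fun _ _ _ => rfl)
  exact pv_argmax n (pvRng r t)
    (fun i =>
      PySem.List.pyGetD
        (t.foldl (fun (st : List Int × List Int) row =>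
          ((PySem.List.pyRange 0 n 1).map (fun i =>
              min (PySem.List.pyGetD st.1 i 0) (PySem.List.pyGetD row i 0)),
           (PySem.List.pyRange 0 n 1).map (fun i =>
              max (PySem.List.pyGetD st.2 i 0) (PySem.List.pyGetD row i 0))))
          (r, r)).2 i 0
      - PySem.List.pyGetD
        (t.foldl (fun (st : List Int × List Int) row =>
          ((PySem.List.pyRange 0 n 1).map (fun i =>
              min (PySem.List.pyGetD st.1 i 0) (PySem.List.pyGetD row i 0)),
           (PySem.List.pyRange 0 n 1).map (fun i =>
              max (PySem.List.pyGetD st.2 i 0) (PySem.List.pyGetD row i 0))))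
          (r, r)).1 i 0)
    (by
      intro i h0 hi
      obtain ⟨h1, h2⟩ := hB i h0 hi
      simp only [h1, h2, pvRng, pvMx, pvMn])
    (PySem.List.pyRange 1 n 1)
    (by
      intro x hx
      have := PySem.List.mem_pyRange_one.mp hx
      omega)
    0 le_rfl hnpos
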